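-- pv_equiv track=rewrite | github.com/sjtu-xx/leetcode | 其他/842.将数组拆分成斐波那契序列.py | splitIntoFibonacci
-- ===== SOURCE A (Python) =====
-- from typing import List
--
-- def splitIntoFibonacci(S: str) -> List[int]:
--     n = len(S)
--     if n < 3:
--         return []
--     for i in range(1,len(S)-1):
--         if S[0]=="0" and i>1:
--             continue
--         for j in range(i+1,len(S)):
--             if S[i]=="0" and j-i>1:
--                 continue
--             Fibonacci_list = [int(S[:i]),int(S[i:j])]
--             tmp_S = S[j:]
--             while True:
--                 if len(tmp_S) == 0:
--                     return Fibonacci_list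
--                 num3 = sum(Fibonacci_list[-2:])
--                 if num3 > 2**31 -1:
--                     break
--                 if tmp_S.startswith(str(num3)):
--                     Fibonacci_list.append(num3)
--                     tmp_S = tmp_S[len(str(num3)):]
--                 else:
--                     break
--     return []
-- ===== SOURCE B (Python) =====
-- from typing import List
--
-- def splitIntoFibonacci(S: str) -> List[int]:
--     n = len(S)
--     if n < 3:
--         return []
--
--     def backtrack(start: int, seq: List[int]):
--         if start == n:
--             return seq if len(seq) >= 3 else None
--         if len(seq) >= 2:
--             need = seq[-1] + seq[-2]
--             if need > 2**31 - 1: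
--                 return None
--             t = str(need)
--             if S.startswith(t, start):
--                 return backtrack(start + len(t), seq + [need])
--             return None
--         for end in range(start + 1, n + 1):
--             if S[start] == '0' and end > start + 1:
--                 break
--             res = backtrack(end, seq + [int(S[start:end])])
--             if res is not None:
--                 return res
--         return None
--
--     return backtrack(0, []) or []
-- ===== Notes on version B (the rewrite author's own statement) =====
-- stated objective: alternative
-- what changed: A's explicit (i,j) double loop with a greedy in-place while-extension is replaced by a single recursive backtracking helper that chooses the first two cuts and then extends deterministically by the forced next number; Pre_ excludes length>=3 strings with a non-digit character, where int() raises (on a few of these, e.g. '12 ', A happens to return [] before reaching the raising slice while B reaches it and raises).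
-- outside the precondition, e.g. on splitIntoFibonacci('12 '): A returns [], B raises ValueError
import Mathlib
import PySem

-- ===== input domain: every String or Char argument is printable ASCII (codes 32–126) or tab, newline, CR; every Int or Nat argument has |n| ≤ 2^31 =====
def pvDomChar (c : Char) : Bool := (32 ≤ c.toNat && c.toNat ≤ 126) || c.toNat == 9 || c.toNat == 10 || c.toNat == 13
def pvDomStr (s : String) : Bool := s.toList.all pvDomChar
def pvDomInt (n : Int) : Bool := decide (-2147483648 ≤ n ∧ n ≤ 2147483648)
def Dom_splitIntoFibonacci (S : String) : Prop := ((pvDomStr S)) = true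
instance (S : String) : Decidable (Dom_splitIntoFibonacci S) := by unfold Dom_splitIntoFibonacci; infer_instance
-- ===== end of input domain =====

-- B replaces A's explicit (i,j) double loop + greedy while-extension by a single recursive
-- backtracking search (choice only for the first two numbers, forced extension afterwards);
-- objective: alternative structure, same asymptotic cost.


-- ===== PORT A =====

-- int(<slice>); PySem.Int.ofChars? is exact (none = ValueError); the ValueError case is
-- excluded by Pre_, so the .getD 0 default is never reached on admitted inputs.
def pvParse (cs : List Char) : Int := (PySem.Int.ofChars? cs).getD 0

-- A's 'while True:' greedy extension; fuel (tmp.length + 1 at the call site) is only a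
-- totality guard: each iteration drops len(str(num3)) ≥ 1 characters, so it never runs out.
def pvAwhile : Nat → List Int → List Char → Option (List Int)
  | 0, _, _ => none
  | fuel + 1, lst, tmp =>
    if tmp.length = 0 then some lst                                     -- if len(tmp_S)==0: return
    else
      let num3 := (PySem.List.slice lst (some (-2)) none).sum           -- sum(Fibonacci_list[-2:])
      if num3 > 2 ^ 31 - 1 then none                                    -- break
      else
        let s3 := PySem.Int.toChars num3                                -- str(num3)
        if PySem.Chars.startswith tmp s3 then
          pvAwhile fuel (lst ++ [num3]) (tmp.drop s3.length)            -- tmp_S[len(str(num3)):]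
        else none                                                       -- break

-- A's inner 'for j in range(i+1, len(S))' (none = fall through to the next i)
def pvAj (cs : List Char) (i : Nat) : List Nat → Option (List Int)
  | [] => none
  | j :: rest =>
    if PySem.List.pyGet? cs (i : Int) = some '0' ∧ j - i > 1 then pvAj cs i rest   -- continue
    else
      let lst := [pvParse (PySem.List.slice cs none (some (i : Int))),  -- int(S[:i])
                  pvParse (PySem.List.slice cs (some (i : Int)) (some (j : Int)))] -- int(S[i:j])
      let tmp := PySem.List.slice cs (some (j : Int)) none              -- S[j:]
      match pvAwhile (tmp.length + 1) lst tmp with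
      | some r => some r
      | none => pvAj cs i rest

-- A's outer 'for i in range(1, len(S)-1)'
def pvAi (cs : List Char) (n : Nat) : List Nat → Option (List Int)
  | [] => none
  | i :: rest =>
    if PySem.List.pyGet? cs 0 = some '0' ∧ i > 1 then pvAi cs n rest    -- continue
    else
      match pvAj cs i (List.range' (i + 1) (n - (i + 1))) with          -- range(i+1, len(S))
      | some r => some r
      | none => pvAi cs n rest

def splitIntoFibonacci (S : String) : List Int :=
  let cs := S.toList
  let n := cs.length
  if n < 3 then []
  else
    -- range(1, len(S)-1) = List.range' 1 (n-2) (n ≥ 3 here, bounds nonnegative)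
    match pvAi cs n (List.range' 1 (n - 2)) with
    | some r => r
    | none => []

-- ===== PORT B =====

mutual
-- Source B's backtrack(start, seq); fuel (n + 2 at the call site) is only a totality guard:
-- every recursive call advances start by at least 1.
def pvBtrack (cs : List Char) (n : Nat) (fuel start : Nat) (seq : List Int) :
    Option (List Int) :=
  match fuel with
  | 0 => none
  | fuel + 1 =>
    if start = n then (if seq.length ≥ 3 then some seq else none)
    else if seq.length ≥ 2 then
      let need := (PySem.List.pyGet? seq (-1)).getD 0 +
                  (PySem.List.pyGet? seq (-2)).getD 0                   -- seq[-1] + seq[-2] (len ≥ 2: never raises)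
      if need > 2 ^ 31 - 1 then none
      else
        let t := PySem.Int.toChars need                                 -- str(need)
        if PySem.Chars.startswith (cs.drop start) t then                -- S.startswith(t, start), start ≤ n
          pvBtrack cs n fuel (start + t.length) (seq ++ [need])
        else none
    else pvBloop cs n fuel start seq (List.range' (start + 1) (n - start)) -- range(start+1, n+1)
termination_by (fuel, 0)

-- the 'for end in range(start+1, n+1)' loop of backtrack
def pvBloop (cs : List Char) (n : Nat) (fuel start : Nat) (seq : List Int) (ends : List Nat) :
    Option (List Int) :=
  match ends with
  | [] => none
  | e :: rest =>
    if PySem.List.pyGet? cs (start : Int) = some '0' ∧ e > start + 1 then none  -- break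
    else
      match pvBtrack cs n fuel e
          (seq ++ [pvParse (PySem.List.slice cs (some (start : Int)) (some (e : Int)))]) with
      | some r => some r
      | none => pvBloop cs n fuel start seq rest
termination_by (fuel, ends.length + 1)
end

def splitIntoFibonacci_alt (S : String) : List Int :=
  let cs := S.toList
  if cs.length < 3 then []
  else (pvBtrack cs cs.length (cs.length + 2) 0 []).getD []             -- backtrack(0, []) or []

-- ===== PRECONDITION & SPEC =====

-- Pre_ excludes strings of length ≥ 3 with a non-digit character: on almost all of them
-- Python A raises ValueError from int() (so does B); on the few where A happens to return []
-- before reaching a raising slice (e.g. "12 "), B's backtracking reaches the raising slice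
-- and raises ValueError, so those are excluded too (see claim cites).
def Pre_splitIntoFibonacci (S : String) : Prop :=
  S.toList.length < 3 ∨ S.toList.all PySem.Chars.isdigit = true
instance (S : String) : Decidable (Pre_splitIntoFibonacci S) := by
  unfold Pre_splitIntoFibonacci; infer_instance

def pvWitness_splitIntoFibonacci : String := "11235813"

def Spec_splitIntoFibonacci (S : String) (out : List Int) : Prop := out = splitIntoFibonacci_alt S
instance (S : String) (out : List Int) : Decidable (Spec_splitIntoFibonacci S out) := by unfold Spec_splitIntoFibonacci; infer_instance

-- ===== CLAIM (what is proved, stated in full; the proofs are below) =====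
def Claim_equal_splitIntoFibonacci : Prop := ∀ (S : String), Dom_splitIntoFibonacci S → Pre_splitIntoFibonacci S → Spec_splitIntoFibonacci S (splitIntoFibonacci S)

-- ===== LEMMAS AND PROOFS =====

-- str(n) is never the empty string
theorem pv_tdc_ne_nil : ∀ (fuel n : Nat) (acc : List Char), acc ≠ [] →
    Nat.toDigitsCore 10 fuel n acc ≠ [] := by
  intro fuel
  induction fuel with
  | zero => intro n acc h; simpa [Nat.toDigitsCore] using h
  | succ f ih =>
    intro n acc h
    simp only [Nat.toDigitsCore]
    split
    · simp
    · exact ih _ _ (by simp)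

theorem pv_toChars_ne_nil (i : Int) : PySem.Int.toChars i ≠ [] := by
  unfold PySem.Int.toChars
  split
  · simp
  · show Nat.toDigits 10 _ ≠ []
    unfold Nat.toDigits
    simp only [Nat.toDigitsCore]
    split
    · simp
    · exact pv_tdc_ne_nil _ _ _ (by simp)

-- sum(lst[-2:]) = lst[-1] + lst[-2] for a list of length ≥ 2
theorem pv_lastTwo (lst : List Int) (h : 2 ≤ lst.length) :
    (PySem.List.slice lst (some (-2)) none).sum =
      (PySem.List.pyGet? lst (-1)).getD 0 + (PySem.List.pyGet? lst (-2)).getD 0 := by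
  obtain ⟨l, x, y, rfl⟩ : ∃ l x y, lst = l ++ [x, y] := by
    rcases hr : lst.reverse with _ | ⟨y, t⟩
    · simp at hr; simp [hr] at h
    · rcases t with _ | ⟨x, l⟩
      · have := congrArg List.reverse hr; simp at this; simp [this] at h
      · exact ⟨l.reverse, x, y, by have := congrArg List.reverse hr; simpa using this⟩
  have hl : (l ++ [x, y]).length = l.length + 2 := by simp
  simp only [PySem.List.slice, PySem.List.clampIdx, PySem.List.pyGet?, PySem.List.pyIdx?, hl]
  norm_num
  rw [if_neg (by omega : ¬((l.length : Int) < 0))]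
  simp only [show Int.toNat 2 = 2 from rfl, Nat.add_sub_cancel]
  rw [List.getElem_append_right (by omega)]
  simp
  ring

-- the forced-extension phase: A's while loop = B's deep recursion
theorem pv_deep_eq (cs : List Char) (n : Nat) (hn : n = cs.length) :
    ∀ (fa fb : Nat) (lst : List Int) (start : Nat), start ≤ n → 2 ≤ lst.length →
      (3 ≤ lst.length ∨ start < n) → n - start < fa → n - start < fb →
      pvBtrack cs n fb start lst = pvAwhile fa lst (cs.drop start) := by
  intro fa
  induction fa with
  | zero => intro fb lst start h1 h2 h3 h4 h5; omega
  | succ fa ih =>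
    intro fb lst start h1 h2 h3 h4 h5
    obtain ⟨fb, rfl⟩ : ∃ fb', fb = fb' + 1 := ⟨fb - 1, by omega⟩
    by_cases hsn : start = n
    · subst hsn
      have h3' : 3 ≤ lst.length := h3.resolve_right (by omega)
      rw [pvBtrack, pvAwhile]
      simp [hn, h3']
    · have hlt : start < n := lt_of_le_of_ne h1 hsn
      have hdl : (cs.drop start).length = n - start := by simp [hn]
      rw [pvBtrack, pvAwhile]
      rw [if_neg hsn, if_pos (by omega : lst.length ≥ 2), if_neg (by omega : ¬ (cs.drop start).length = 0)]
      rw [← pv_lastTwo lst h2]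
      set need := (PySem.List.slice lst (some (-2)) none).sum with hneed
      by_cases hov : need > 2 ^ 31 - 1
      · rw [if_pos hov, if_pos hov]
      · rw [if_neg hov, if_neg hov]
        set t := PySem.Int.toChars need with ht
        by_cases hsw : PySem.Chars.startswith (cs.drop start) t = true
        · rw [if_pos hsw, if_pos hsw]
          have hpre : t <+: cs.drop start := (PySem.Chars.startswith_iff _ _).mp hsw
          have htle : t.length ≤ n - start := by
            have := hpre.length_le; omega
          have htpos : 0 < t.length :=
            List.length_pos_of_ne_nil (pv_toChars_ne_nil need)
          rw [List.drop_drop]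
          exact ih fb (lst ++ [need]) (start + t.length) (by omega) (by simp; omega)
            (by left; simp; omega) (by omega) (by omega)
        · rw [if_neg hsw, if_neg hsw]

-- once a leading-zero skip fires, every later j of A's inner loop is skipped too
theorem pv_jskip (cs : List Char) (i : Nat) (h0 : PySem.List.pyGet? cs (i : Int) = some '0') :
    ∀ js : List Nat, (∀ j ∈ js, i + 1 < j) → pvAj cs i js = none := by
  intro js hjs
  induction js with
  | nil => rfl
  | cons j rest ih =>
    have hc : PySem.List.pyGet? cs (i : Int) = some '0' ∧ j - i > 1 :=
      ⟨h0, by have := hjs j (by simp); omega⟩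
    simp only [pvAj, if_pos hc]
    exact ih (fun j hj => hjs j (by simp [hj]))

-- same for A's outer loop
theorem pv_iskip (cs : List Char) (n : Nat) (h0 : PySem.List.pyGet? cs 0 = some '0') :
    ∀ is : List Nat, (∀ i ∈ is, 1 < i) → pvAi cs n is = none := by
  intro is his
  induction is with
  | nil => rfl
  | cons i rest ih =>
    have hc : PySem.List.pyGet? cs 0 = some '0' ∧ i > 1 := ⟨h0, his i (by simp)⟩
    simp only [pvAi, if_pos hc]
    exact ih (fun i hi => his i (by simp [hi]))

-- depth-1: B's loop over the second cut = A's inner j loop (B additionally tries e = n, which fails)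
theorem pv_loop1_eq (cs : List Char) (n : Nat) (hn : n = cs.length) (i f : Nat)
    (hf : n - i ≤ f) (hi : i < n) (p1 : Int)
    (hp1 : p1 = pvParse (PySem.List.slice cs none (some (i : Int)))) :
    ∀ (k a : Nat), i + 1 ≤ a → a + k = n + 1 →
      pvBloop cs n f i [p1] (List.range' a k) = pvAj cs i (List.range' a (k - 1)) := by
  obtain ⟨f, rfl⟩ : ∃ f', f = f' + 1 := ⟨f - 1, by omega⟩
  intro k
  induction k with
  | zero => intro a ha hk; simp [pvBloop, pvAj]
  | succ m ih =>
    intro a ha hk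
    have han : a ≤ n := by omega
    rw [List.range'_succ, pvBloop]
    by_cases hbr : PySem.List.pyGet? cs (i : Int) = some '0' ∧ a > i + 1
    · rw [if_pos hbr]
      rw [pv_jskip cs i hbr.1 _ ?side]
      case side =>
        intro j hj
        have := List.mem_range'_1.mp hj
        omega
    · rw [if_neg hbr]
      have hson : (PySem.List.slice cs (some ((a : Nat) : Int)) none).length = n - a := by
        rw [PySem.List.slice_from cs (by positivity)]
        simp [hn]
      rcases m with _ | m'
      · -- last element e = n of B's loop: fails (only two numbers); A's list is already empty
        have ha' : a = n := by omega
        rw [pvBtrack]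
        simp [ha', pvBloop, pvAj]
      · have haltn : a < n := by omega
        have hhead : pvBtrack cs n (f + 1) a
            ([p1] ++ [pvParse (PySem.List.slice cs (some (i : Int)) (some (a : Int)))]) =
            pvAwhile ((PySem.List.slice cs (some ((a : Nat) : Int)) none).length + 1)
              [pvParse (PySem.List.slice cs none (some (i : Int))),
               pvParse (PySem.List.slice cs (some (i : Int)) (some (a : Int)))]
              (PySem.List.slice cs (some ((a : Nat) : Int)) none) := by
          rw [hp1, List.singleton_append, hson,
              PySem.List.slice_from cs (by positivity : (0:Int) ≤ ((a : Nat) : Int))]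
          simp only [Int.toNat_natCast]
          exact pv_deep_eq cs n hn (n - a + 1) (f + 1) _ a han (by simp)
            (Or.inr haltn) (by omega) (by omega)
        rw [hhead]
        have hAside : List.range' a (m' + 1 + 1 - 1) = a :: List.range' (a + 1) m' := by
          simp [List.range'_succ]
        rw [hAside, pvAj]
        rw [if_neg (by intro hc; exact hbr ⟨hc.1, by omega⟩)]
        rcases hmatch : pvAwhile ((PySem.List.slice cs (some ((a : Nat) : Int)) none).length + 1)
            [pvParse (PySem.List.slice cs none (some (i : Int))),
             pvParse (PySem.List.slice cs (some (i : Int)) (some (a : Int)))]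
            (PySem.List.slice cs (some ((a : Nat) : Int)) none) with _ | r
        · simp only [hmatch]
          have := ih (a + 1) (by omega) (by omega)
          simpa using this
        · simp only [hmatch]

-- depth-0: B's loop over the first cut = A's outer i loop (B additionally tries e = n-1, n)
theorem pv_loop0_eq (cs : List Char) (n : Nat) (hn : n = cs.length) (hn3 : 3 ≤ n) (f : Nat)
    (hf : n ≤ f) :
    ∀ (k a : Nat), 1 ≤ a → a + k = n + 1 →
      pvBloop cs n f 0 [] (List.range' a k) = pvAi cs n (List.range' a (k - 2)) := by
  obtain ⟨f, rfl⟩ : ∃ f', f = f' + 1 := ⟨f - 1, by omega⟩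
  intro k
  induction k with
  | zero => intro a ha hk; simp [pvBloop, pvAi]
  | succ m ih =>
    intro a ha hk
    have han : a ≤ n := by omega
    rw [List.range'_succ, pvBloop]
    by_cases hbr : PySem.List.pyGet? cs ((0 : Nat) : Int) = some '0' ∧ a > 0 + 1
    · rw [if_pos hbr]
      rw [pv_iskip cs n (by simpa using hbr.1) _ ?side]
      case side =>
        intro j hj
        have := List.mem_range'_1.mp hj
        omega
    · rw [if_neg hbr]
      rcases Nat.eq_or_lt_of_le han with ha' | haltn
      · -- a = n (so m = 0): B's extra last candidate fails (single number)
        have hm : m = 0 := by omega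
        subst hm
        rw [pvBtrack]
        simp [ha', pvBloop, pvAi]
      · -- a < n: B's head candidate = A's head iteration, via the depth-1 lemma
        have hhead : pvBtrack cs n (f + 1) a
            ([] ++ [pvParse (PySem.List.slice cs (some ((0 : Nat) : Int)) (some (a : Int)))]) =
            pvAj cs a (List.range' (a + 1) (n - (a + 1))) := by
          rw [pvBtrack]
          rw [if_neg (by omega : ¬ a = n)]
          rw [if_neg (by simp)]
          have hsl0 : pvParse (PySem.List.slice cs (some ((0 : Nat) : Int)) (some (a : Int))) =
              pvParse (PySem.List.slice cs none (some ((a : Nat) : Int))) := by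
            rw [PySem.List.slice_natCast, PySem.List.slice_to cs (by positivity)]
            simp
          rw [List.nil_append, hsl0]
          have := pv_loop1_eq cs n hn a f (by omega) haltn _ rfl (n - a) (a + 1)
            (by omega) (by omega)
          rw [this, Nat.sub_sub]
        rcases m with _ | m'
        · omega
        · rw [hhead]
          rcases m' with _ | m''
          · -- a = n - 1: A's list is exhausted; B's head fails too
            have hAnil : List.range' a (0 + 1 + 1 - 2) = [] := rfl
            rw [hAnil, pvAi]
            have : n - (a + 1) = 0 := by omega
            rw [this]
            have hAj : pvAj cs a (List.range' (a + 1) 0) = none := rfl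
            rw [hAj]
            have := ih (a + 1) (by omega) (by omega)
            simpa using this
          · have hAside : List.range' a (m'' + 1 + 1 + 1 - 2) = a :: List.range' (a + 1) m'' := by
              simp [List.range'_succ]
            rw [hAside, pvAi]
            rw [if_neg (by intro hc; exact hbr ⟨by simpa using hc.1, by omega⟩)]
            rcases hmatch : pvAj cs a (List.range' (a + 1) (n - (a + 1))) with _ | r
            · have := ih (a + 1) (by omega) (by omega)
              simpa using this
            · rfl

-- ===== VERDICT (by name: the statement is the Claim_ definition above) =====
theorem splitIntoFibonacci_spec : Claim_equal_splitIntoFibonacci := by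
  intro S _ _
  unfold Spec_splitIntoFibonacci splitIntoFibonacci splitIntoFibonacci_alt
  show _ = if S.toList.length < 3 then []
    else (pvBtrack S.toList S.toList.length (S.toList.length + 2) 0 []).getD []
  by_cases h3 : S.toList.length < 3
  · rw [if_pos h3, if_pos h3]
  · rw [if_neg h3, if_neg h3]
    have h0 : pvBtrack S.toList S.toList.length (S.toList.length + 2) 0 [] =
        pvBloop S.toList S.toList.length (S.toList.length + 1) 0 [] (List.range' 1 S.toList.length) := by
      rw [pvBtrack]
      rw [if_neg (by omega : ¬ 0 = S.toList.length), if_neg (by simp)]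
      norm_num
    rw [h0, pv_loop0_eq S.toList S.toList.length rfl (by omega) (S.toList.length + 1) (by omega)
      S.toList.length 1 (by omega) (by omega)]
    rcases pvAi S.toList S.toList.length (List.range' 1 (S.toList.length - 2)) with _ | r <;> simp
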